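-- pv_equiv track=rewrite | github.com/Mustafailhann/E-Mutabakat-Pro | kdv_iade_listesi.py | truncate_with_items
-- ===== SOURCE A (Python) =====
-- CHAR_LIMIT = 72
--
-- def truncate_with_items(items_list, max_length=CHAR_LIMIT, separator='-'):
--     """
--     Birden fazla kalemi tire ile birleştir, 255 karakteri aşarsa kısalt.
--     """
--     if not items_list:
--         return ''
--
--     # Clean and filter empty items
--     items_list = [str(item).strip() for item in items_list if item and str(item).strip()]
--
--     if not items_list:
--         return ''
--
--     # Try to fit all items
--     result = separator.join(items_list)
--
--     if len(result) <= max_length: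
--         return result
--
--     # Need to truncate - try to include as many items as possible
--     result_items = []
--     current_length = 0
--
--     for item in items_list:
--         # Calculate length if we add this item
--         if result_items:
--             needed = len(separator) + len(item)
--         else:
--             needed = len(item)
--
--         if current_length + needed <= max_length - 3:  # Leave room for "..."
--             result_items.append(item)
--             current_length += needed
--         else:
--             # Can't fit more - truncate last item if needed
--             break
--
--     if result_items:
--         result = separator.join(result_items)
--         if len(result) > max_length:
--             result = result[:max_length-3] + '...'
--     else:
--         # First item alone is too long
--         result = items_list[0][:max_length-3] + '...'
--
--     return result
-- ===== SOURCE B (Python) =====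
-- CHAR_LIMIT = 72
--
-- def truncate_with_items(items_list, max_length=CHAR_LIMIT, separator='-'):
--     if not items_list:
--         return ''
--     items = [str(item).strip() for item in items_list if item and str(item).strip()]
--     if not items:
--         return ''
--     full = separator.join(items)
--     if len(full) <= max_length:
--         return full
--     # Precompute incremental costs and their cumulative sums, then count how
--     # many prefix items fit in the budget (cums is nondecreasing).
--     budget = max_length - 3
--     costs = [len(items[0])] + [len(separator) + len(it) for it in items[1:]]
--     cums = []
--     total = 0
--     for c in costs:
--         total += c
--         cums.append(total)
--     k = sum(1 for t in cums if t <= budget)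
--     if k:
--         return separator.join(items[:k])
--     return items[0][:budget] + '...'
-- ===== Notes on version B (the rewrite author's own statement) =====
-- stated objective: alternative
-- what changed: Replaced the greedy break-loop that appends items while they fit by a precompute-then-select pass: build per-item incremental costs, their cumulative sums, and count how many prefix sums fit the budget; the fitted case drops A's dead re-truncation branch.
import Mathlib
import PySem

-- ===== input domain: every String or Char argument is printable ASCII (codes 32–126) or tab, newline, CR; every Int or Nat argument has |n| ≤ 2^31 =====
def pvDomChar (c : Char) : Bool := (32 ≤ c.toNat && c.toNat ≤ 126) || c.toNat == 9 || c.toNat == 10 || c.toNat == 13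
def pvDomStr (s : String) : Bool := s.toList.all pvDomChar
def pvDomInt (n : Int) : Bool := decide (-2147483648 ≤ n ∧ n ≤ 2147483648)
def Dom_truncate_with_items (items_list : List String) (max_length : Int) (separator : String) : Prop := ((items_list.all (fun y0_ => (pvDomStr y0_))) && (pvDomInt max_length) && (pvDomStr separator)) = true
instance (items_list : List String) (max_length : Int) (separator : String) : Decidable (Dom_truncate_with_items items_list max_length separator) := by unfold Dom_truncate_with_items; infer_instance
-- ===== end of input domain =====

-- B replaces A's greedy break-loop by a cost/cumulative-sum table and a prefix count; same result, similar cost ("alternative").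

-- shared clean/filter step: [str(item).strip() for item in items_list if item and str(item).strip()]
def pvCleanItems (items_list : List String) : List String :=
  (items_list.filter (fun it => it != "" && PySem.Str.strip it != "")).map PySem.Str.strip

-- ===== PORT A =====
-- A's for-loop with break over items, state (result_items, current_length)
def pvALoop (sep : String) (m : Int) : List String → List String → Int → List String × Int
  | [], acc, cur => (acc, cur)
  | it :: rest, acc, cur =>
    let needed := if acc.isEmpty then PySem.Str.len it else PySem.Str.len sep + PySem.Str.len it
    if cur + needed ≤ m - 3 then pvALoop sep m rest (acc ++ [it]) (cur + needed)
    else (acc, cur)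

def truncate_with_items (items_list : List String) (max_length : Int) (separator : String) : String :=
  if items_list.isEmpty then "" else
  let items := pvCleanItems items_list
  if items.isEmpty then "" else
  let result := PySem.Str.join separator items
  if PySem.Str.len result ≤ max_length then result else
  let r := pvALoop separator max_length items [] 0
  if !r.1.isEmpty then
    let res := PySem.Str.join separator r.1
    if PySem.Str.len res > max_length then PySem.Str.slice res none (some (max_length - 3)) ++ "..." else res
  else
    -- items_list[0]: guarded nonempty here, pyGetD with default is exact
    PySem.Str.slice (PySem.List.pyGetD items 0 "") none (some (max_length - 3)) ++ "..."

-- ===== PORT B =====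
-- costs = [len(items[0])] + [len(separator)+len(it) for it in items[1:]]
def pvCosts (sep : String) : List String → List Int
  | [] => []
  | x :: rest => PySem.Str.len x :: rest.map (fun it => PySem.Str.len sep + PySem.Str.len it)

def truncate_with_items_alt (items_list : List String) (max_length : Int) (separator : String) : String :=
  if items_list.isEmpty then "" else
  let items := pvCleanItems items_list
  if items.isEmpty then "" else
  let full := PySem.Str.join separator items
  if PySem.Str.len full ≤ max_length then full else
  let budget := max_length - 3
  let costs := pvCosts separator items
  let cums := (costs.foldl (fun (p : Int × List Int) c => (p.1 + c, p.2 ++ [p.1 + c])) (0, [])).2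
  let k := cums.countP (fun t => decide (t ≤ budget))
  if k ≠ 0 then PySem.Str.join separator (PySem.List.slice items none (some (k : Int)))
  else PySem.Str.slice (PySem.List.pyGetD items 0 "") none (some budget) ++ "..."

-- ===== PRECONDITION & SPEC =====
def Spec_truncate_with_items (items_list : List String) (max_length : Int) (separator : String) (out : String) : Prop := out = truncate_with_items_alt items_list max_length separator
instance (items_list : List String) (max_length : Int) (separator : String) (out : String) : Decidable (Spec_truncate_with_items items_list max_length separator out) := by unfold Spec_truncate_with_items; infer_instance

-- ===== CLAIM (what is proved, stated in full; the proofs are below) =====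
def Claim_equal_truncate_with_items : Prop := ∀ (items_list : List String) (max_length : Int) (separator : String), Dom_truncate_with_items items_list max_length separator → Spec_truncate_with_items items_list max_length separator (truncate_with_items items_list max_length separator)

-- ===== LEMMAS AND PROOFS =====

-- cumulative sums, recursively (proof-side view of B's foldl)
def pvCums : Int → List Int → List Int
  | _, [] => []
  | t, c :: cs => (t + c) :: pvCums (t + c) cs

theorem pvFoldl_eq_pvCums (cs : List Int) (t : Int) (acc : List Int) :
    (cs.foldl (fun (p : Int × List Int) c => (p.1 + c, p.2 ++ [p.1 + c])) (t, acc)).2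
      = acc ++ pvCums t cs := by
  induction cs generalizing t acc with
  | nil => simp [pvCums]
  | cons c cs ih => simp [List.foldl, pvCums, ih]

theorem pvCums_lower (cs : List Int) (t : Int) (h : ∀ c ∈ cs, 0 ≤ c) :
    ∀ x ∈ pvCums t cs, t ≤ x := by
  induction cs generalizing t with
  | nil => simp [pvCums]
  | cons c cs ih =>
    intro x hx
    simp only [pvCums, List.mem_cons] at hx
    have hc : 0 ≤ c := h c (by simp)
    rcases hx with rfl | hx
    · omega
    · have := ih (t + c) (fun d hd => h d (by simp [hd])) x hx
      omega

theorem pvCums_countP_zero (cs : List Int) (t m3 : Int) (h : ∀ c ∈ cs, 0 ≤ c)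
    (ht : ¬ t ≤ m3) : (pvCums t cs).countP (fun x => decide (x ≤ m3)) = 0 := by
  rw [List.countP_eq_zero]
  intro x hx
  have := pvCums_lower cs t h x hx
  simp only [decide_eq_true_eq]
  omega

theorem pvInter_append (sep : List Char) (l : List (List Char)) (x : List Char) (h : l ≠ []) :
    sep.intercalate (l ++ [x]) = sep.intercalate l ++ sep ++ x := by
  induction l with
  | nil => simp at h
  | cons a as ih =>
    cases as with
    | nil => simp [List.intercalate]
    | cons b bs =>
      have h2 := ih (by simp)
      simp [List.intercalate] at h2 ⊢
      simp [h2]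

theorem pvJoin_append_singleton (sep : String) (acc : List String) (x : String)
    (h : acc.isEmpty = false) :
    PySem.Str.len (PySem.Str.join sep (acc ++ [x]))
      = PySem.Str.len (PySem.Str.join sep acc) + PySem.Str.len sep + PySem.Str.len x := by
  have hne : acc.map String.toList ≠ [] := by cases acc <;> simp_all
  simp [PySem.Str.join, PySem.Str.len, PySem.Chars.join, pvInter_append _ _ _ hne]
  omega

theorem pvLen_nonneg (s : String) : 0 ≤ PySem.Str.len s := by
  simp [PySem.Str.len]

theorem pvALoop_cons (sep c : String) (m cur : Int) (cs acc : List String)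
    (hacc : acc.isEmpty = false) :
    pvALoop sep m (c :: cs) acc cur
      = if cur + (PySem.Str.len sep + PySem.Str.len c) ≤ m - 3
        then pvALoop sep m cs (acc ++ [c]) (cur + (PySem.Str.len sep + PySem.Str.len c))
        else (acc, cur) := by
  rw [pvALoop]
  simp only [hacc, Bool.false_eq_true, if_false]

theorem pvALoop_first (sep x : String) (m : Int) (rest : List String) :
    pvALoop sep m (x :: rest) [] 0
      = if 0 + PySem.Str.len x ≤ m - 3
        then pvALoop sep m rest [x] (0 + PySem.Str.len x)
        else ([], 0) := by
  rw [pvALoop]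
  simp only [List.isEmpty_nil, if_true, List.nil_append]

-- main loop invariant: with a nonempty accumulator, A's loop keeps exactly the prefix
-- whose shifted cumulative sums fit, and the joined result stays within the budget
theorem pvALoop_tail (sep : String) (m : Int) (cs : List String) :
    ∀ acc cur, acc.isEmpty = false → cur ≤ m - 3 →
      cur = PySem.Str.len (PySem.Str.join sep acc) →
      (pvALoop sep m cs acc cur).1
        = acc ++ cs.take ((pvCums cur (cs.map (fun it => PySem.Str.len sep + PySem.Str.len it))).countP
            (fun t => decide (t ≤ m - 3)))
      ∧ (pvALoop sep m cs acc cur).1.isEmpty = false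
      ∧ PySem.Str.len (PySem.Str.join sep (pvALoop sep m cs acc cur).1) ≤ m - 3 := by
  induction cs with
  | nil =>
    intro acc cur hne hcur hlen
    rw [pvALoop]
    simp only [pvCums, List.map_nil, List.countP_nil, List.take_zero, List.append_nil]
    exact ⟨trivial, hne, by rw [← hlen]; exact hcur⟩
  | cons c cs ih =>
    intro acc cur hne hcur hlen
    have hcost : ∀ d ∈ cs.map (fun it => PySem.Str.len sep + PySem.Str.len it), 0 ≤ d := by
      intro d hd
      simp only [List.mem_map] at hd
      obtain ⟨it, _, rfl⟩ := hd
      have := pvLen_nonneg sep; have := pvLen_nonneg it; omega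
    rw [pvALoop_cons sep c m cur cs acc hne]
    simp only [pvCums, List.map_cons]
    rw [List.countP_cons]
    by_cases hfit : cur + (PySem.Str.len sep + PySem.Str.len c) ≤ m - 3
    · rw [if_pos hfit]
      have hlen' : cur + (PySem.Str.len sep + PySem.Str.len c)
          = PySem.Str.len (PySem.Str.join sep (acc ++ [c])) := by
        rw [pvJoin_append_singleton sep acc c hne, ← hlen]; ring
      have hmain := ih (acc ++ [c]) (cur + (PySem.Str.len sep + PySem.Str.len c))
        (by simp) hfit hlen'
      refine ⟨?_, hmain.2.1, hmain.2.2⟩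
      rw [hmain.1]
      have hd : (decide (cur + (PySem.Str.len sep + PySem.Str.len c) ≤ m - 3)) = true :=
        decide_eq_true hfit
      simp only [hd, if_true, List.take_succ_cons, List.append_assoc, List.cons_append,
        List.nil_append]
    · rw [if_neg hfit]
      have h0 := pvCums_countP_zero (cs.map (fun it => PySem.Str.len sep + PySem.Str.len it))
        (cur + (PySem.Str.len sep + PySem.Str.len c)) (m - 3) hcost hfit
      have hd : (decide (cur + (PySem.Str.len sep + PySem.Str.len c) ≤ m - 3)) = false :=
        decide_eq_false hfit
      refine ⟨?_, hne, by rw [← hlen]; exact hcur⟩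
      rw [h0, hd]
      simp

-- ===== VERDICT (by name: the statement is the Claim_ definition above) =====
theorem truncate_with_items_spec : Claim_equal_truncate_with_items := by
  intro items_list max_length separator _
  unfold Spec_truncate_with_items
  simp only [truncate_with_items, truncate_with_items_alt]
  by_cases h0 : items_list.isEmpty = true
  · rw [if_pos h0, if_pos h0]
  rw [if_neg h0, if_neg h0]
  cases hx : pvCleanItems items_list with
  | nil => simp
  | cons x rest =>
  simp only [List.isEmpty_cons, Bool.false_eq_true, if_false]
  by_cases h2 : PySem.Str.len (PySem.Str.join separator (x :: rest)) ≤ max_length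
  · rw [if_pos h2, if_pos h2]
  rw [if_neg h2, if_neg h2]
  rw [pvFoldl_eq_pvCums]
  simp only [List.nil_append, pvCosts, pvCums]
  rw [pvALoop_first]
  by_cases hfit : 0 + PySem.Str.len x ≤ max_length - 3
  · -- first item fits: A's loop runs with acc = [x]; B counts at least one prefix sum
    rw [if_pos hfit]
    have hlen1 : (0 : Int) + PySem.Str.len x = PySem.Str.len (PySem.Str.join separator [x]) := by
      simp [PySem.Str.join, PySem.Str.len, PySem.Chars.join, List.intercalate]
    have hmain := pvALoop_tail separator max_length rest [x] (0 + PySem.Str.len x)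
      (by simp) hfit hlen1
    have hkc : ((0 + PySem.Str.len x) :: pvCums (0 + PySem.Str.len x)
          (rest.map (fun it => PySem.Str.len separator + PySem.Str.len it))).countP
            (fun t => decide (t ≤ max_length - 3))
        = (pvCums (0 + PySem.Str.len x)
            (rest.map (fun it => PySem.Str.len separator + PySem.Str.len it))).countP
              (fun t => decide (t ≤ max_length - 3)) + 1 := by
      have hfit' : (x.length : Int) ≤ max_length - 3 := by simpa using hfit
      rw [List.countP_cons]; simp [hfit']
    rw [hkc]
    rw [if_pos (show (!(pvALoop separator max_length rest [x] (0 + PySem.Str.len x)).1.isEmpty) = true by rw [hmain.2.1]; rfl)]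
    rw [if_neg (show ¬ PySem.Str.len (PySem.Str.join separator (pvALoop separator max_length rest [x] (0 + PySem.Str.len x)).1) > max_length by have := hmain.2.2; omega)]
    rw [if_pos (by omega)]
    rw [hmain.1]
    rw [PySem.List.slice_to _ (by positivity)]
    simp [List.take_succ_cons]
  · -- first item does not fit: A keeps nothing, B counts zero prefix sums
    rw [if_neg hfit]
    have hcost : ∀ d ∈ rest.map (fun it => PySem.Str.len separator + PySem.Str.len it), 0 ≤ d := by
      intro d hd
      simp only [List.mem_map] at hd
      obtain ⟨it, _, rfl⟩ := hd
      have := pvLen_nonneg separator; have := pvLen_nonneg it; omega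
    have h0c := pvCums_countP_zero (rest.map (fun it => PySem.Str.len separator + PySem.Str.len it))
      (0 + PySem.Str.len x) (max_length - 3) hcost hfit
    have hkc0 : ((0 + PySem.Str.len x) :: pvCums (0 + PySem.Str.len x)
          (rest.map (fun it => PySem.Str.len separator + PySem.Str.len it))).countP
            (fun t => decide (t ≤ max_length - 3)) = 0 := by
      have hfit' : ¬ (x.length : Int) ≤ max_length - 3 := by simpa using hfit
      rw [List.countP_cons, h0c]; simp [hfit']
    rw [hkc0]
    rw [if_neg (by simp), if_neg (by simp)]
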